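-- pv_equiv track=rewrite | github.com/kehindefagbohungbe/practice-polybuild-URSSI | src/gro_parser.py | split_into_molecules
-- ===== SOURCE A (Python) =====
-- def split_into_molecules(gro_content):
--     molecules = {}
--     current_molecule = None
--     for line in gro_content:
--         if line.startswith('Mol'):
--             current_molecule = line.split()[0]
--             molecules[current_molecule] = []
--         elif current_molecule:
--             molecules[current_molecule].append(line)
--     return molecules
-- ===== SOURCE B (Python) =====
-- def split_into_molecules(gro_content):
--     # Two index scans over a materialized list: slice out each molecule's body
--     # between consecutive 'Mol' headers instead of appending line by line.
--     lines = list(gro_content)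
--     n = len(lines)
--     molecules = {}
--     i = 0
--     while i < n and not lines[i].startswith('Mol'):  # skip lines before the first header
--         i += 1
--     while i < n:
--         j = i + 1
--         while j < n and not lines[j].startswith('Mol'):
--             j += 1
--         molecules[lines[i].split()[0]] = lines[i + 1:j]
--         i = j
--     return molecules
-- ===== Notes on version B (the rewrite author's own statement) =====
-- stated objective: alternative
-- what changed: Replaces the stateful dict-accumulating fold (current-molecule variable plus per-line append) by a group-splitting scan: skip the pre-header prefix, then for each header locate the next header and assign the slice between them in one step.
import Mathlib
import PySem

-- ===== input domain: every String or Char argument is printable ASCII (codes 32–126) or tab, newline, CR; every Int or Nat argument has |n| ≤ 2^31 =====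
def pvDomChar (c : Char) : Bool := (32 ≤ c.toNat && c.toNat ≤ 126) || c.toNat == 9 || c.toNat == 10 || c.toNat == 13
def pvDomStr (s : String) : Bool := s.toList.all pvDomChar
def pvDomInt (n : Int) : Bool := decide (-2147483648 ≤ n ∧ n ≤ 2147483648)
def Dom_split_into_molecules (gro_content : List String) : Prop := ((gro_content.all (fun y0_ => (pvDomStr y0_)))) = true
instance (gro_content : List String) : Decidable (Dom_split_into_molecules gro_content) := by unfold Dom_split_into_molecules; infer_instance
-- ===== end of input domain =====

-- B replaces A's stateful dict-accumulating fold by a group-splitting scan (slice per header); same result, no speed claim.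

-- ===== PORT A =====
-- `line.split()[0]`: whenever the callers below evaluate it, `line` starts with 'Mol',
-- so the split is nonempty and `headD ""` is exact (the IndexError branch is unreachable).
def pvNameOf (line : String) : String := (PySem.Str.split₀ line).headD ""

-- one iteration of A's loop; state = (molecules, current_molecule).
-- `molecules[current_molecule].append(line)` is `modify cur [] (· ++ [line])`: the key is
-- always present when this branch runs (it was inserted when current_molecule was set),
-- so Python's KeyError branch is unreachable and the `[]` default is never used.
def pvAStep (st : PySem.Dict String (List String) × Option String) (line : String) :
    PySem.Dict String (List String) × Option String :=
  if PySem.Str.startswith line "Mol" then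
    let name := pvNameOf line
    (st.1.insert name [], some name)
  else
    match st.2 with
    | some cur =>
        -- `elif current_molecule:` — Python truthiness of the string: non-None and nonempty
        if cur == "" then st else (st.1.modify cur [] (fun v => v ++ [line]), st.2)
    | none => st

def split_into_molecules (gro_content : List String) : List (String × List String) :=
  (gro_content.foldl pvAStep (PySem.Dict.empty, none)).1.items

-- ===== PORT B =====
def pvIsHeader (line : String) : Bool := PySem.Str.startswith line "Mol"

-- B's outer while-loop: at each header, the inner index scan to the next header is the
-- takeWhile/dropWhile split of the suffix, and the slice lines[i+1:j] is the takeWhile part.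
def pvGroups : List String → PySem.Dict String (List String) → PySem.Dict String (List String)
  | [], d => d
  | h :: rest, d =>
      pvGroups (rest.dropWhile (fun l => !pvIsHeader l))
        (d.insert (pvNameOf h) (rest.takeWhile (fun l => !pvIsHeader l)))
termination_by xs _ => xs.length
decreasing_by
  have := List.length_dropWhile_le (fun l => !pvIsHeader l) rest
  simp; omega

-- B's first while-loop (skip lines before the first header) is the dropWhile.
def split_into_molecules_alt (gro_content : List String) : List (String × List String) :=
  (pvGroups (gro_content.dropWhile (fun l => !pvIsHeader l)) PySem.Dict.empty).items

-- ===== PRECONDITION & SPEC =====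
def Spec_split_into_molecules (gro_content : List String) (out : List (String × List String)) : Prop := out = split_into_molecules_alt gro_content
instance (gro_content : List String) (out : List (String × List String)) : Decidable (Spec_split_into_molecules gro_content out) := by unfold Spec_split_into_molecules; infer_instance

-- ===== CLAIM (what is proved, stated in full; the proofs are below) =====
def Claim_equal_split_into_molecules : Prop := ∀ (gro_content : List String), Dom_split_into_molecules gro_content → Spec_split_into_molecules gro_content (split_into_molecules gro_content)

-- ===== LEMMAS AND PROOFS =====

-- tokens produced by Python's str.split() are nonempty, and there is one if the scan
-- has a pending or finished token
theorem pvGo_ne_nil (s cur : List Char) (acc : List (List Char))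
    (h : cur ≠ [] ∨ acc ≠ []) : PySem.Chars.split₀.go s cur acc ≠ [] := by
  induction s generalizing cur acc with
  | nil =>
      unfold PySem.Chars.split₀.go
      by_cases hc : cur = []
      · have ha : acc ≠ [] := by
          rcases h with h | h
          · exact absurd hc h
          · exact h
        simp [hc, ha]
      · simp [List.isEmpty_iff, hc]
  | cons c rest ih =>
      unfold PySem.Chars.split₀.go
      by_cases hs : PySem.Chars.isspace c = true
      · by_cases hc : cur = []
        · have ha : acc ≠ [] := by
            rcases h with h | h
            · exact absurd hc h
            · exact h
          simpa [hs, hc] using ih [] acc (Or.inr ha)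
        · simpa [hs, List.isEmpty_iff, hc] using ih [] (cur.reverse :: acc) (Or.inr (by simp))
      · simpa [hs] using ih (c :: cur) acc (Or.inl (by simp))

theorem pvGo_all_ne (s cur : List Char) (acc : List (List Char))
    (h : ∀ t ∈ acc, t ≠ []) : ∀ t ∈ PySem.Chars.split₀.go s cur acc, t ≠ [] := by
  induction s generalizing cur acc with
  | nil =>
      unfold PySem.Chars.split₀.go
      by_cases hc : cur = []
      · simpa [hc] using h
      · intro t ht
        simp [List.isEmpty_iff, hc] at ht
        rcases ht with ht | ht
        · exact h t ht
        · simp [ht, hc]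
  | cons c rest ih =>
      unfold PySem.Chars.split₀.go
      by_cases hs : PySem.Chars.isspace c = true
      · by_cases hc : cur = []
        · simpa [hs, hc, List.isEmpty_iff] using ih [] acc h
        · simpa [hs, hc, List.isEmpty_iff] using
            ih [] (cur.reverse :: acc) (by
              intro t ht
              rcases List.mem_cons.mp ht with ht | ht
              · simp [ht, hc]
              · exact h t ht)
      · simpa [hs] using ih (c :: cur) acc h

-- a line starting with 'Mol' has a nonempty first split() token
theorem pvNameOf_ne (line : String) (h : PySem.Str.startswith line "Mol" = true) :
    pvNameOf line ≠ "" := by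
  have hpre : ("Mol".toList) <+: line.toList := by
    rw [PySem.Str.startswith_eq] at h
    exact (PySem.Chars.startswith_iff _ _).mp h
  obtain ⟨t, ht⟩ := hpre
  have hM : line.toList = 'M' :: ('o' :: ('l' :: t)) := by
    simpa using ht.symm
  have hsplit : PySem.Chars.split₀ line.toList =
      PySem.Chars.split₀.go t ['l', 'o', 'M'] [] := by
    rw [hM]
    simp [PySem.Chars.split₀, PySem.Chars.split₀.go, PySem.Chars.isspace]
  have hnil : PySem.Chars.split₀ line.toList ≠ [] := by
    rw [hsplit]; exact pvGo_ne_nil _ _ _ (Or.inl (by simp))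
  have hall : ∀ u ∈ PySem.Chars.split₀ line.toList, u ≠ [] := by
    rw [hsplit]; exact pvGo_all_ne _ _ _ (by simp)
  unfold pvNameOf
  unfold PySem.Str.split₀
  cases hcs : PySem.Chars.split₀ line.toList with
  | nil => exact absurd hcs hnil
  | cons u us =>
      have hu : u ≠ [] := hall u (by rw [hcs]; exact List.mem_cons_self)
      simp only [List.map_cons, List.headD_cons]
      intro he
      exact hu (by simpa using congrArg String.toList he)

-- A's loop ignores lines while current_molecule is still None
theorem pvSkip (xs : List String) (d : PySem.Dict String (List String)) :
    List.foldl pvAStep (d, none) xs =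
      List.foldl pvAStep (d, none) (xs.dropWhile (fun l => !pvIsHeader l)) := by
  induction xs with
  | nil => rfl
  | cons x xs ih =>
      by_cases hx : pvIsHeader x = true
      · simp [hx]
      · have hstep : pvAStep (d, none) x = (d, none) := by
          simp [pvAStep, pvIsHeader] at hx ⊢
          simp [hx]
        simp only [List.dropWhile_cons, hx]
        simpa [List.foldl_cons, hstep] using ih

-- inside one molecule's body, A's appends amount to one insert of the accumulated list
theorem pvBody (body : List String) (rest' : List String)
    (d : PySem.Dict String (List String)) (name : String) (acc : List String)
    (hname : name ≠ "") (hbody : ∀ l ∈ body, pvIsHeader l = false) :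
    List.foldl pvAStep (d.insert name acc, some name) (body ++ rest') =
      List.foldl pvAStep (d.insert name (acc ++ body), some name) rest' := by
  induction body generalizing acc with
  | nil => simp
  | cons b body ih =>
      have hb : pvIsHeader b = false := hbody b List.mem_cons_self
      have hstep : pvAStep (d.insert name acc, some name) b =
          (d.insert name (acc ++ [b]), some name) := by
        simp [pvAStep, pvIsHeader] at hb ⊢
        simp [hb, hname, PySem.Dict.modify, PySem.Dict.getD_insert_self,
          PySem.Dict.insert_insert_self]
      rw [List.cons_append, List.foldl_cons, hstep,
        ih (acc ++ [b]) (fun l hl => hbody l (List.mem_cons_of_mem b hl))]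
      simp

-- main invariant: from a state whose current molecule (if any) has a nonempty name,
-- on a list that is empty or starts with a header, A's fold computes B's groups
theorem pvMain (n : Nat) (xs : List String) (d : PySem.Dict String (List String))
    (cur : Option String) (hn : xs.length ≤ n)
    (hstart : xs = [] ∨ ∃ h rest, xs = h :: rest ∧ pvIsHeader h = true)
    (hcur : ∀ s, cur = some s → s ≠ "") :
    (List.foldl pvAStep (d, cur) xs).1 = pvGroups xs d := by
  induction n generalizing xs d cur with
  | zero =>
      have : xs = [] := List.eq_nil_of_length_eq_zero (Nat.le_zero.mp hn)
      subst this; simp [pvGroups]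
  | succ n ih =>
      rcases hstart with h0 | ⟨h, rest, hxs, hh⟩
      · subst h0; simp [pvGroups]
      · subst hxs
        have hname : pvNameOf h ≠ "" := pvNameOf_ne h (by simpa [pvIsHeader] using hh)
        have hstep : pvAStep (d, cur) h = (d.insert (pvNameOf h) [], some (pvNameOf h)) := by
          simp [pvAStep, pvIsHeader] at hh ⊢
          simp [hh]
        have hdecomp : rest = rest.takeWhile (fun l => !pvIsHeader l) ++
            rest.dropWhile (fun l => !pvIsHeader l) :=
          (List.takeWhile_append_dropWhile).symm
        rw [List.foldl_cons, hstep]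
        conv_lhs => rw [hdecomp]
        rw [pvBody _ _ d (pvNameOf h) [] hname
          (fun l hl => by simpa using List.mem_takeWhile_imp hl)]
        have hlen : (rest.dropWhile (fun l => !pvIsHeader l)).length ≤ n := by
          have := List.length_dropWhile_le (fun l => !pvIsHeader l) rest
          simp at hn; omega
        have hstart2 : rest.dropWhile (fun l => !pvIsHeader l) = [] ∨
            ∃ h2 rest2, rest.dropWhile (fun l => !pvIsHeader l) = h2 :: rest2 ∧
              pvIsHeader h2 = true := by
          cases hdw : rest.dropWhile (fun l => !pvIsHeader l) with
          | nil => exact Or.inl rfl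
          | cons h2 rest2 =>
              refine Or.inr ⟨h2, rest2, rfl, ?_⟩
              have := List.head_dropWhile_not (fun l => !pvIsHeader l)
                (l := rest) (by simp [hdw])
              simpa [hdw] using this
        rw [ih _ _ (some (pvNameOf h)) hlen hstart2
          (fun s hs => by injection hs with hs; exact hs ▸ hname)]
        conv_rhs => rw [pvGroups]
        simp

-- ===== VERDICT (by name: the statement is the Claim_ definition above) =====
theorem split_into_molecules_spec : Claim_equal_split_into_molecules := by
  intro xs _
  unfold Spec_split_into_molecules split_into_molecules split_into_molecules_alt
  rw [pvSkip]
  have hstart : xs.dropWhile (fun l => !pvIsHeader l) = [] ∨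
      ∃ h2 rest2, xs.dropWhile (fun l => !pvIsHeader l) = h2 :: rest2 ∧
        pvIsHeader h2 = true := by
    cases hdw : xs.dropWhile (fun l => !pvIsHeader l) with
    | nil => exact Or.inl rfl
    | cons h2 rest2 =>
        refine Or.inr ⟨h2, rest2, rfl, ?_⟩
        have := List.head_dropWhile_not (fun l => !pvIsHeader l) (l := xs) (by simp [hdw])
        simpa [hdw] using this
  exact congrArg PySem.Dict.items
    (pvMain (xs.dropWhile (fun l => !pvIsHeader l)).length _ PySem.Dict.empty none
      le_rfl hstart (fun s hs => by cases hs))
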